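-- pv_equiv track=rewrite | github.com/River-Mt/Algorithm | 프로그래머스/unrated/181855. 문자열 묶기/문자열 묶기.py | solution
-- ===== SOURCE A (Python) =====
-- from collections import defaultdict
--
-- def solution(strArr):
--     answer = 0
--     dic = defaultdict(list)
--
--     for s in strArr:
--         dic[len(s)].append(s)
--
--     for k in dic.keys():
--         answer = max(answer, len(dic[k]))
--
--     return answer
-- ===== SOURCE B (Python) =====
-- def solution(strArr):
--     lens = sorted(len(s) for s in strArr)
--     best = 0
--     cur = 0
--     prev = None
--     for x in lens:
--         cur = cur + 1 if x == prev else 1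
--         prev = x
--         best = max(best, cur)
--     return best
-- ===== Notes on version B (the rewrite author's own statement) =====
-- stated objective: alternative
-- what changed: Replaces the defaultdict grouping (lists per length, then max of their sizes) by sorting the list of lengths and one linear run-length pass tracking the longest run of equal consecutive lengths.
import Mathlib
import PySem

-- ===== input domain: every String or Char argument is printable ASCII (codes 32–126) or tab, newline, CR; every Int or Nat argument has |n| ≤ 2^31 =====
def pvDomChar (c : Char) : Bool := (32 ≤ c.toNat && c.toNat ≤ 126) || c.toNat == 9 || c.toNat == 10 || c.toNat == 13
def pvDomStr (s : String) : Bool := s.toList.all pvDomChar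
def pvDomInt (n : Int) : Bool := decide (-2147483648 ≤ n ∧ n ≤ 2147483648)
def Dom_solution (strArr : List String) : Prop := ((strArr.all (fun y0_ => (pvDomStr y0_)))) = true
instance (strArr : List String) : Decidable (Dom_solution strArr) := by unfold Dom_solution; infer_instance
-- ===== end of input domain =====

-- B groups equal lengths by sorting instead of A's hash grouping: same value, different algorithm.

-- ===== PORT A =====
-- dic = defaultdict(list); for s in strArr: dic[len(s)].append(s)
-- for k in dic.keys(): answer = max(answer, len(dic[k]))
def solution (strArr : List String) : Int :=
  let dic : PySem.Dict Int (List String) :=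
    strArr.foldl (fun d s => d.modify (PySem.Str.len s) [] (fun l => l ++ [s])) PySem.Dict.empty
  dic.keys.foldl (fun answer k => max answer (PySem.List.len (dic.getD k []))) 0

-- ===== PORT B =====
-- loop body: cur = cur + 1 if x == prev else 1; prev = x; best = max(best, cur)
-- state = (prev, cur, best)
def runStep (st : Option Int × Int × Int) (x : Int) : Option Int × Int × Int :=
  let cur : Int := if st.1 == some x then st.2.1 + 1 else 1
  (some x, cur, max st.2.2 cur)

def solution_alt (strArr : List String) : Int :=
  let lens := PySem.List.sorted (strArr.map (fun s => PySem.Str.len s)) (fun x => x) false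
  (lens.foldl runStep (none, 0, 0)).2.2

-- ===== PRECONDITION & SPEC =====
def Spec_solution (strArr : List String) (out : Int) : Prop := out = solution_alt strArr
instance (strArr : List String) (out : Int) : Decidable (Spec_solution strArr out) := by unfold Spec_solution; infer_instance

-- ===== CLAIM (what is proved, stated in full; the proofs are below) =====
def Claim_equal_solution : Prop := ∀ (strArr : List String), Dom_solution strArr → Spec_solution strArr (solution strArr)

-- ===== LEMMAS AND PROOFS =====

-- fold of 'answer = max(answer, f k)'
def fmax (f : Int → Int) (a : Int) (l : List Int) : Int := l.foldl (fun a k => max a (f k)) a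
lemma fmax_cons (f : Int → Int) (a : Int) (x : Int) (l : List Int) :
    fmax f a (x :: l) = fmax f (max a (f x)) l := rfl

lemma fmax_ge_init (f : Int → Int) (a : Int) (l : List Int) : a ≤ fmax f a l := by
  induction l generalizing a with
  | nil => exact le_refl a
  | cons x t ih => exact le_trans (le_max_left a (f x)) (ih (max a (f x)))

lemma fmax_ge_mem (f : Int → Int) (a : Int) (l : List Int) (k : Int) (hk : k ∈ l) :
    f k ≤ fmax f a l := by
  induction l generalizing a with
  | nil => cases hk
  | cons x t ih =>
    rcases List.mem_cons.mp hk with h | h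
    · subst h
      exact le_trans (le_max_right a (f k)) (fmax_ge_init f (max a (f k)) t)
    · exact ih (max a (f x)) h

lemma fmax_cases (f : Int → Int) (a : Int) (l : List Int) :
    fmax f a l = a ∨ ∃ k ∈ l, fmax f a l = f k := by
  induction l generalizing a with
  | nil => exact Or.inl rfl
  | cons x t ih =>
    rw [fmax_cons]
    rcases ih (max a (f x)) with h | ⟨k, hk, hke⟩
    · rcases max_cases a (f x) with ⟨he, _⟩ | ⟨he, _⟩
      · exact Or.inl (h.trans he)
      · exact Or.inr ⟨x, List.mem_cons_self, h.trans he⟩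
    · exact Or.inr ⟨k, List.mem_cons_of_mem x hk, hke⟩

lemma fmax_le_of (f : Int → Int) (a : Int) (l : List Int) (b : Int)
    (ha : a ≤ b) (hl : ∀ k ∈ l, f k ≤ b) : fmax f a l ≤ b := by
  rcases fmax_cases f a l with h | ⟨k, hk, hke⟩
  · rw [h]; exact ha
  · rw [hke]; exact hl k hk

lemma fmax_eq_of_mem_iff (f : Int → Int) (a : Int) (l₁ l₂ : List Int)
    (h : ∀ x, x ∈ l₁ ↔ x ∈ l₂) : fmax f a l₁ = fmax f a l₂ := by
  apply le_antisymm
  · exact fmax_le_of f a l₁ _ (fmax_ge_init f a l₂)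
      (fun k hk => fmax_ge_mem f a l₂ k ((h k).mp hk))
  · exact fmax_le_of f a l₂ _ (fmax_ge_init f a l₁)
      (fun k hk => fmax_ge_mem f a l₁ k ((h k).mpr hk))

lemma foldl_congr' {α β : Type} (l : List α) (f g : β → α → β) (a : β)
    (h : ∀ b x, x ∈ l → f b x = g b x) : l.foldl f a = l.foldl g a := by
  induction l generalizing a with
  | nil => rfl
  | cons x t ih =>
    simp only [List.foldl_cons]
    rw [h a x List.mem_cons_self]
    exact ih _ (fun b y hy => h b y (List.mem_cons_of_mem _ hy))

-- B-side: run-length fold lemmas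
lemma run_best_split (l : List Int) (pr : Option Int) (c b b' : Int) :
    (l.foldl runStep (pr, c, max b b')).2.2 = max b ((l.foldl runStep (pr, c, b')).2.2) := by
  induction l generalizing pr c b' with
  | nil => rfl
  | cons x t ih =>
    simp only [List.foldl_cons, runStep]
    have : max (max b b') (if pr == some x then c + 1 else 1)
        = max b (max b' (if pr == some x then c + 1 else 1)) := max_assoc b b' _
    rw [this]
    exact ih _ _ _

lemma run_const (r : List Int) (x : Int) (hr : ∀ y ∈ r, y = x) (c b : Int) (hcb : c ≤ b) :
    r.foldl runStep (some x, c, b) = (some x, c + r.length, max b (c + r.length)) := by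
  induction r generalizing c b with
  | nil => simp [max_eq_left hcb]
  | cons y t ih =>
    have hy : y = x := hr y List.mem_cons_self
    subst hy
    rw [List.foldl_cons]
    have hstep : runStep (some y, c, b) y = (some y, c + 1, max b (c + 1)) := by
      simp [runStep]
    rw [hstep, ih (fun z hz => hr z (List.mem_cons_of_mem _ hz)) (c + 1) (max b (c + 1))
      (le_max_right _ _)]
    simp only [List.length_cons, Prod.mk.injEq]
    refine ⟨trivial, ?_, ?_⟩ <;> push_cast <;> omega

lemma run_fresh (y : Int) (t : List Int) (p : Int) (c c' b : Int) (hy : y ≠ p) :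
    (y :: t).foldl runStep (some p, c, b) = (y :: t).foldl runStep (none, c', b) := by
  simp only [List.foldl_cons, runStep]
  have h1 : ((some p : Option Int) == some y) = false := by
    simp [Ne.symm hy]
  have h2 : ((none : Option Int) == some y) = false := rfl
  rw [h1, h2]
  simp

-- main B-side lemma: on a nondecreasing list, the run-length pass computes the max count
lemma run_eq_fmax : ∀ (n : Nat) (S : List Int), S.length ≤ n → S.Pairwise (· ≤ ·) →
    (S.foldl runStep (none, 0, 0)).2.2 = fmax (fun k => (S.count k : Int)) 0 S := by
  intro n
  induction n with
  | zero =>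
    intro S hlen _
    have : S = [] := List.eq_nil_of_length_eq_zero (Nat.le_zero.mp hlen)
    subst this; rfl
  | succ n ih =>
    intro S hlen hsorted
    cases S with
    | nil => rfl
    | cons x t =>
      set r := t.takeWhile (fun y => y == x) with hr
      set rest := t.dropWhile (fun y => y == x) with hrest
      have hsplit : t = r ++ rest := (List.takeWhile_append_dropWhile).symm
      have hrx : ∀ y ∈ r, y = x := by
        intro y hy
        have := List.mem_takeWhile_imp hy
        exact eq_of_beq this
      -- every element of rest differs from x
      have hxle : ∀ z ∈ t, x ≤ z := by
        intro z hz
        exact (List.pairwise_cons.mp hsorted).1 z hz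
      have hrestne : ∀ z ∈ rest, z ≠ x := by
        intro z hz
        cases hrest' : rest with
        | nil => rw [hrest'] at hz; cases hz
        | cons y t' =>
          have hy : ¬ (y == x) = true := by
            have := List.head?_dropWhile_not (fun y => y == x) t
            rw [← hrest, hrest'] at this
            simp at this
            simpa using this
          have hyx : x < y := by
            have hxy : x ≤ y := hxle y (by rw [hsplit, hrest']; simp)
            have : y ≠ x := by simpa using hy
            omega
          rw [hrest'] at hz
          rcases List.mem_cons.mp hz with h | h
          · subst h; omega
          · -- z after y in rest: y ≤ z from pairwise
            have hpt : t.Pairwise (· ≤ ·) := (List.pairwise_cons.mp hsorted).2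
            have hprest : rest.Pairwise (· ≤ ·) := by
              rw [hsplit] at hpt
              exact (List.pairwise_append.mp hpt).2.1
            have hyz : y ≤ z := by
              rw [hrest'] at hprest
              exact (List.pairwise_cons.mp hprest).1 z h
            omega
      have hprest : rest.Pairwise (· ≤ ·) := by
        have hpt : t.Pairwise (· ≤ ·) := (List.pairwise_cons.mp hsorted).2
        rw [hsplit] at hpt
        exact (List.pairwise_append.mp hpt).2.1
      have hrestlen : rest.length ≤ n := by
        have : t.length ≤ n := by simpa using Nat.lt_succ_iff.mp (Nat.lt_of_lt_of_le (by simp) hlen)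
        have : rest.length ≤ t.length := by
          rw [hsplit]; simp
        omega
      -- counts
      have hcx : ((x :: t).count x : Int) = 1 + r.length := by
        rw [hsplit]
        have h1 : r.count x = r.length := by
          rw [List.count_eq_length]
          intro b hb; exact (hrx b hb) ▸ rfl
        have h2 : rest.count x = 0 := by
          rw [List.count_eq_zero]
          intro hmem; exact (hrestne x hmem) rfl
        simp [List.count_cons, List.count_append, h1, h2]
        omega
      have hck : ∀ k, k ≠ x → (x :: t).count k = rest.count k := by
        intro k hk
        rw [hsplit]
        have h1 : r.count k = 0 := by
          rw [List.count_eq_zero]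
          intro hmem; exact hk (hrx k hmem) |>.elim
        simp [List.count_cons, List.count_append, h1, hk, Ne.symm hk]
      -- LHS computation
      have hL : ((x :: t).foldl runStep (none, 0, 0)).2.2
          = max (1 + (r.length : Int)) ((rest.foldl runStep (none, 0, 0)).2.2) := by
        rw [hsplit, List.foldl_cons]
        have hstep0 : runStep (none, 0, 0) x = (some x, 1, 1) := by simp [runStep]
        rw [hstep0, List.foldl_append, run_const r x hrx 1 1 (le_refl 1)]
        have hmax1 : max (1:Int) (1 + (r.length : Int)) = 1 + r.length := by
          have : (0:Int) ≤ r.length := Int.natCast_nonneg _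
          omega
        rw [hmax1]
        cases hrest' : rest with
        | nil => simp [hrest']; omega
        | cons y t' =>
          have hy : y ≠ x := hrestne y (by rw [hrest']; exact List.mem_cons_self)
          rw [run_fresh y t' x _ 0 _ hy]
          have hb : (1 + (r.length : Int)) = max (1 + (r.length : Int)) 0 := by
            have : (0:Int) ≤ r.length := Int.natCast_nonneg _
            omega
          rw [hb, run_best_split, ← hb]
      -- RHS characterization
      have hR : fmax (fun k => (((x :: t).count k : Nat) : Int)) 0 (x :: t)
          = max (1 + (r.length : Int)) (fmax (fun k => ((rest.count k : Nat) : Int)) 0 rest) := by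
        apply le_antisymm
        · apply fmax_le_of
          · have : (0:Int) ≤ r.length := Int.natCast_nonneg _
            have h2 : (0:Int) ≤ fmax (fun k => ((rest.count k : Nat) : Int)) 0 rest :=
              fmax_ge_init _ 0 rest
            omega
          · intro k hk
            by_cases hkx : k = x
            · subst hkx
              rw [hcx]
              exact le_max_left _ _
            · rw [hck k hkx]
              refine le_trans ?_ (le_max_right (1 + (r.length : Int)) _)
              have hkrest : k ∈ rest := by
                rcases List.mem_cons.mp hk with h | h
                · exact (hkx h).elim
                · rw [hsplit] at h
                  rcases List.mem_append.mp h with h | h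
                  · exact (hkx (hrx k h)).elim
                  · exact h
              exact fmax_ge_mem _ 0 rest k hkrest
        · apply max_le
          · rw [← hcx]
            exact fmax_ge_mem _ 0 (x :: t) x List.mem_cons_self
          · apply fmax_le_of
            · exact fmax_ge_init _ 0 (x :: t)
            · intro k hk
              have hkx : k ≠ x := hrestne k hk
              have : (x :: t).count k = rest.count k := hck k hkx
              rw [← this]
              exact fmax_ge_mem _ 0 (x :: t) k
                (by rw [hsplit]; exact List.mem_cons_of_mem _ (List.mem_append_right _ hk))
      rw [hL, hR, ih rest hrestlen hprest]

-- ===== VERDICT (by name: the statement is the Claim_ definition above) =====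
theorem solution_spec : Claim_equal_solution := by
  intro strArr _
  unfold Spec_solution solution solution_alt
  set L := strArr.map (fun s => PySem.Str.len s) with hdefL
  set S := PySem.List.sorted L (fun x => x) false with hdefS
  -- A side: dict fold → fmax of counts over the distinct keys
  have hA : (strArr.foldl (fun d s => d.modify (PySem.Str.len s) [] (fun l => l ++ [s]))
        PySem.Dict.empty).keys.foldl
        (fun answer k => max answer (PySem.List.len
          ((strArr.foldl (fun d s => d.modify (PySem.Str.len s) [] (fun l => l ++ [s]))
            PySem.Dict.empty).getD k [])))
        0
      = fmax (fun k => (L.count k : Int)) 0 (PySem.Set.ofList L) := by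
    have hkeys : (strArr.foldl (fun d s => d.modify (PySem.Str.len s) [] (fun l => l ++ [s]))
        PySem.Dict.empty).keys = PySem.Set.ofList L := by
      rw [PySem.Dict.keys_foldl_modify_key]
      rw [show (PySem.Dict.empty : PySem.Dict Int (List String)).keys = [] from rfl,
        PySem.Set.update_nil_left, hdefL]
    have hgetD : ∀ k, (strArr.foldl (fun d s => d.modify (PySem.Str.len s) [] (fun l => l ++ [s]))
        PySem.Dict.empty).getD k [] =
        ((strArr.map (fun s => (PySem.Str.len s, s))).filter (fun p => p.1 == k)).map (fun p => p.2) := by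
      intro k
      have := PySem.Dict.getD_foldl_modify_append
        (l := strArr.map (fun s => (PySem.Str.len s, s))) (d := PySem.Dict.empty) (c := k)
      rw [List.foldl_map] at this
      simpa [PySem.Dict.getD, PySem.Dict.empty] using this
    rw [hkeys]
    unfold fmax
    apply foldl_congr'
    intro a k _
    rw [hgetD k]
    congr 1
    rw [PySem.List.len_eq]
    simp only [List.length_map]
    rw [← List.countP_eq_length_filter]
    rw [List.countP_map]
    rw [hdefL, List.count_eq_countP, List.countP_map]
    rfl
  rw [hA]
  -- B side
  have hperm : S.Perm L := PySem.List.sorted_perm L (fun x => x) false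
  have hsorted : S.Pairwise (· ≤ ·) := by
    have := PySem.List.sorted_pairwise L (fun x => x)
    simpa using this
  have hB : (S.foldl runStep (none, 0, 0)).2.2 = fmax (fun k => (S.count k : Int)) 0 S :=
    run_eq_fmax S.length S (le_refl _) hsorted
  rw [hB]
  have hcnteq : (fun k => ((S.count k : Nat) : Int)) = (fun k => ((L.count k : Nat) : Int)) := by
    funext k
    rw [hperm.count_eq]
  rw [hcnteq]
  exact fmax_eq_of_mem_iff _ 0 (PySem.Set.ofList L) S
    (fun x => by rw [PySem.Set.mem_ofList, hperm.mem_iff])
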